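-- pv_equiv track=rewrite | github.com/chengzhang/pybp | leetcode/1584_min_cost_to_connect_all_points.py | sort_by_x_then_by_y
-- ===== SOURCE A (Python) =====
-- def sort_by_x_then_by_y(points, x_lst, x_to_idx):
--     result = [list() for _ in x_lst]
--     for p in points:
--         x_idx = x_to_idx[p[0]]
--         result[x_idx].append(p)
--     for i, points_at_x in enumerate(result):
--         result[i] = sorted(points_at_x, key=lambda p: p[1])
--     return result
-- ===== SOURCE B (Python) =====
-- def sort_by_x_then_by_y(points, x_lst, x_to_idx):
--     result = [[] for _ in x_lst]
--     for p in sorted(points, key=lambda p: p[1]):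
--         result[x_to_idx[p[0]]].append(p)
--     return result
-- ===== Notes on version B (the rewrite author's own statement) =====
-- stated objective: alternative
-- what changed: A distributes points into per-x buckets and then sorts each bucket by y in a second pass; B sorts the whole points list by y once and then distributes in a single pass, relying on sort stability so each bucket comes out in the same y-order.
import Mathlib
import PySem

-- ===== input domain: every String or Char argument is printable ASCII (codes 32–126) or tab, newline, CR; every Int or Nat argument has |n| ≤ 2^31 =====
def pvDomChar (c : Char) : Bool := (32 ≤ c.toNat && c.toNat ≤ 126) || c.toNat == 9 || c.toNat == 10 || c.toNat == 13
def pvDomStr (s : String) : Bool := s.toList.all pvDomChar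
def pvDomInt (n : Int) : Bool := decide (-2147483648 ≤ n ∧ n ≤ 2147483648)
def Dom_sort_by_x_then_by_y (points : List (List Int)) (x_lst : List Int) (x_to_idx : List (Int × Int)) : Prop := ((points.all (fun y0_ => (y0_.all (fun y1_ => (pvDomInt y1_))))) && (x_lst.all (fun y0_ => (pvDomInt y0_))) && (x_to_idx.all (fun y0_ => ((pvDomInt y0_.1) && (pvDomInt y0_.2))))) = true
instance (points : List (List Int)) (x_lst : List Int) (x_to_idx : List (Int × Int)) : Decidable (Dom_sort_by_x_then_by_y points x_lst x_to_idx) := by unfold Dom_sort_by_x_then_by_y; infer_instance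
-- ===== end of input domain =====

-- B sorts the whole points list by y once and then distributes into the x-buckets in a single
-- pass (stability keeps each bucket in y-order), instead of A's distribute-then-sort-each-bucket.

-- ===== PORT A =====
def sort_by_x_then_by_y (points : List (List Int)) (x_lst : List Int) (x_to_idx : List (Int × Int)) : List (List (List Int)) :=
  let result0 : List (List (List Int)) := x_lst.map (fun _ => [])
  let result1 := points.foldl (fun res p =>
    let x_idx := (x_to_idx.lookup (PySem.List.pyGetD p 0 0)).getD 0
    -- result[x_idx].append(p): replace the bucket at x_idx by itself with p appended
    PySem.List.pySetD res x_idx (PySem.List.pyGetD res x_idx [] ++ [p])) result0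
  -- for i, points_at_x in enumerate(result): result[i] = sorted(points_at_x, key=λp. p[1])
  result1.map (fun pts => PySem.List.sorted pts (fun q => PySem.List.pyGetD q 1 0))

-- ===== PORT B =====
-- the 'for p in …: result[x_to_idx[p[0]]].append(p)' loop of Source B, as structural recursion
def pyDistribute (x_to_idx : List (Int × Int)) : List (List Int) → List (List (List Int)) → List (List (List Int))
  | [], result => result
  | p :: ps, result =>
      let i := (x_to_idx.lookup (PySem.List.pyGetD p 0 0)).getD 0
      pyDistribute x_to_idx ps (PySem.List.pySetD result i (PySem.List.pyGetD result i [] ++ [p]))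

def sort_by_x_then_by_y_alt (points : List (List Int)) (x_lst : List Int) (x_to_idx : List (Int × Int)) : List (List (List Int)) :=
  pyDistribute x_to_idx
    (PySem.List.sorted points (fun q => PySem.List.pyGetD q 1 0))
    (x_lst.map (fun _ => []))

-- ===== PRECONDITION & SPEC =====
-- Pre_ is exactly where Python A returns: every point has at least two coordinates, its x is a
-- key of x_to_idx, and the mapped index is a valid Python index into a list of len(x_lst) buckets.
def Pre_sort_by_x_then_by_y (points : List (List Int)) (x_lst : List Int) (x_to_idx : List (Int × Int)) : Prop :=
  ∀ p ∈ points, 2 ≤ p.length ∧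
    ((x_to_idx.lookup (PySem.List.pyGetD p 0 0)).any
      (fun v => decide (-(x_lst.length : Int) ≤ v) && decide (v < (x_lst.length : Int)))) = true
instance (points : List (List Int)) (x_lst : List Int) (x_to_idx : List (Int × Int)) : Decidable (Pre_sort_by_x_then_by_y points x_lst x_to_idx) := by unfold Pre_sort_by_x_then_by_y; infer_instance
def pvWitness_sort_by_x_then_by_y : List (List Int) × List Int × (List (Int × Int)) :=
  ([[0, 7], [3, 2], [0, 1]], [0, 3], [(0, 0), (3, 1)])
def Spec_sort_by_x_then_by_y (points : List (List Int)) (x_lst : List Int) (x_to_idx : List (Int × Int)) (out : List (List (List Int))) : Prop := out = sort_by_x_then_by_y_alt points x_lst x_to_idx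
instance (points : List (List Int)) (x_lst : List Int) (x_to_idx : List (Int × Int)) (out : List (List (List Int))) : Decidable (Spec_sort_by_x_then_by_y points x_lst x_to_idx out) := by unfold Spec_sort_by_x_then_by_y; infer_instance

-- ===== CLAIM =====
def Claim_equal_sort_by_x_then_by_y : Prop := ∀ (points : List (List Int)) (x_lst : List Int) (x_to_idx : List (Int × Int)), Dom_sort_by_x_then_by_y points x_lst x_to_idx → Pre_sort_by_x_then_by_y points x_lst x_to_idx → Spec_sort_by_x_then_by_y points x_lst x_to_idx (sort_by_x_then_by_y points x_lst x_to_idx)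

-- ===== LEMMAS AND PROOFS =====

-- the bucket key of a point, and its normalised (Python-wrapped) Nat index
def keyOf (x_to_idx : List (Int × Int)) (p : List Int) : Int :=
  (x_to_idx.lookup (PySem.List.pyGetD p 0 0)).getD 0

def bIdx (n : Nat) (v : Int) : Nat := (if v < 0 then v + n else v).toNat

theorem bIdx_lt (n : Nat) (v : Int) (h1 : -(n : Int) ≤ v) (h2 : v < n) : bIdx n v < n := by
  unfold bIdx; split <;> omega

theorem pyIdx?_inrange (n : Nat) (i : Int) (h1 : -(n : Int) ≤ i) (h2 : i < n) :
    PySem.List.pyIdx? n i = some (bIdx n i) := by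
  unfold PySem.List.pyIdx? bIdx
  split_ifs <;> simp only [Option.some.injEq] <;> omega

theorem pySetD_inrange {α : Type} (xs : List α) (i : Int) (v : α)
    (h1 : -(xs.length : Int) ≤ i) (h2 : i < xs.length) :
    PySem.List.pySetD xs i v = xs.set (bIdx xs.length i) v := by
  unfold PySem.List.pySetD PySem.List.pySet?
  rw [pyIdx?_inrange _ _ h1 h2]
  rfl

theorem pyGetD_inrange {α : Type} (xs : List α) (i : Int) (d : α)
    (h1 : -(xs.length : Int) ≤ i) (h2 : i < xs.length) (hn : bIdx xs.length i < xs.length) :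
    PySem.List.pyGetD xs i d = xs[bIdx xs.length i] := by
  unfold PySem.List.pyGetD PySem.List.pyGet?
  rw [pyIdx?_inrange _ _ h1 h2]
  simp [List.getElem?_eq_getElem hn]

-- the distribution loop, characterised bucket by bucket
theorem distrib_getElem? (x_to_idx : List (Int × Int)) (points : List (List Int))
    (res : List (List (List Int)))
    (h : ∀ p ∈ points, -(res.length : Int) ≤ keyOf x_to_idx p ∧ keyOf x_to_idx p < res.length)
    (j : Nat) :
    (points.foldl (fun res p =>
      let x_idx := (x_to_idx.lookup (PySem.List.pyGetD p 0 0)).getD 0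
      PySem.List.pySetD res x_idx (PySem.List.pyGetD res x_idx [] ++ [p])) res)[j]? =
    (res[j]?).map (· ++ points.filter (fun p => bIdx res.length (keyOf x_to_idx p) == j)) := by
  induction points generalizing res with
  | nil => cases hr : res[j]? <;> simp_all
  | cons p ps ih =>
    obtain ⟨h1, h2⟩ := h p (by simp)
    have hb : bIdx res.length (keyOf x_to_idx p) < res.length := bIdx_lt _ _ h1 h2
    rw [List.foldl_cons]
    simp only []
    rw [show ((x_to_idx.lookup (PySem.List.pyGetD p 0 0)).getD 0) = keyOf x_to_idx p from rfl,
        pySetD_inrange _ _ _ h1 h2, pyGetD_inrange _ _ _ h1 h2 hb]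
    rw [ih _ (by
      intro q hq
      have := h q (by simp [hq])
      simpa using this)]
    by_cases hj : j = bIdx res.length (keyOf x_to_idx p)
    · subst hj
      rw [List.getElem?_set_self (by omega)]
      simp only [List.getElem?_eq_getElem hb, Option.map_some, List.filter_cons]
      simp [List.append_assoc]
    · rw [List.getElem?_set_ne (by omega)]
      have hf : (bIdx res.length (keyOf x_to_idx p) == j) = false := by
        simp; omega
      simp [hf]

theorem pyDistribute_eq_foldl (x_to_idx : List (Int × Int)) (points : List (List Int))
    (res : List (List (List Int))) :
    pyDistribute x_to_idx points res = points.foldl (fun res p =>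
      let x_idx := (x_to_idx.lookup (PySem.List.pyGetD p 0 0)).getD 0
      PySem.List.pySetD res x_idx (PySem.List.pyGetD res x_idx [] ++ [p])) res := by
  induction points generalizing res with
  | nil => rfl
  | cons p ps ih => rw [pyDistribute, List.foldl_cons, ih]

theorem insertBy_cons_of_forall {α : Type} (before : α → α → Bool) (x : α) (zs : List α)
    (h : ∀ z ∈ zs, before x z = true) :
    PySem.List.insertBy before x zs = x :: zs := by
  cases zs with
  | nil => rfl
  | cons z zs => rw [PySem.List.insertBy]; simp [h z (by simp)]

theorem insertBy_cons_of_not_before {α : Type} (before : α → α → Bool) (x y : α) (ys : List α)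
    (h : before x y = false) :
    PySem.List.insertBy before x (y :: ys) = y :: PySem.List.insertBy before x ys := by
  rw [PySem.List.insertBy]
  simp [h]

-- filtering a key-sorted list commutes with insertion
theorem filter_insertBy {α : Type} (key : α → Int) (q : α → Bool) (x : α) (ys : List α)
    (hs : ys.Pairwise (fun a b => key a ≤ key b)) :
    (PySem.List.insertBy (fun a b => decide (key a < key b)) x ys).filter q
      = if q x then PySem.List.insertBy (fun a b => decide (key a < key b)) x (ys.filter q)
        else ys.filter q := by
  induction ys with
  | nil =>
    cases hqx : q x <;> simp [PySem.List.insertBy, hqx]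
  | cons y ys ih =>
    rw [List.pairwise_cons] at hs
    obtain ⟨hy, hs'⟩ := hs
    by_cases hlt : key x < key y
    · rw [PySem.List.insertBy, if_pos (by simpa using hlt)]
      cases hqx : q x with
      | false =>
        rw [List.filter_cons, if_neg (by simp [hqx]), if_neg (by simp)]
      | true =>
        rw [List.filter_cons, if_pos hqx, if_pos rfl,
            insertBy_cons_of_forall _ x (List.filter q (y :: ys)) (by
              intro z hz
              have hz' := List.mem_of_mem_filter hz
              simp only [List.mem_cons] at hz'
              simp only [decide_eq_true_eq]
              rcases hz' with rfl | hz'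
              · exact hlt
              · have := hy z hz'
                omega)]
    · rw [PySem.List.insertBy, if_neg (by simpa using hlt)]
      cases hqx : q x with
      | false =>
        simp [List.filter_cons, ih hs', hqx]
      | true =>
        simp only [List.filter_cons, ih hs', hqx, if_pos trivial]
        cases hqy : q y with
        | false => simp
        | true =>
          simp only [if_pos trivial]
          rw [insertBy_cons_of_not_before _ x y (List.filter q ys)
            (by simp only [decide_eq_false_iff_not]; exact hlt)]

-- filtering commutes with the stable sort
theorem filter_sorted {α : Type} (key : α → Int) (q : α → Bool) (xs : List α) :
    (PySem.List.sorted xs key false).filter q = PySem.List.sorted (xs.filter q) key false := by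
  induction xs using List.reverseRecOn with
  | nil => rfl
  | append_singleton xs x ih =>
    rw [PySem.List.sorted_eq_foldl_insertBy, List.foldl_append, List.foldl_cons, List.foldl_nil,
        ← PySem.List.sorted_eq_foldl_insertBy]
    rw [filter_insertBy key q x _ (PySem.List.sorted_pairwise xs key), ih]
    rw [List.filter_append]
    cases hqx : q x with
    | false => simp [hqx]
    | true =>
      simp only [if_pos trivial]
      rw [show List.filter q [x] = [x] from by simp [hqx]]
      rw [PySem.List.sorted_eq_foldl_insertBy (xs.filter q ++ [x]), List.foldl_append,
          List.foldl_cons, List.foldl_nil, ← PySem.List.sorted_eq_foldl_insertBy]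

-- ===== VERDICT =====
theorem sort_by_x_then_by_y_spec : Claim_equal_sort_by_x_then_by_y := by
  intro points x_lst x_to_idx _ hpre
  unfold Spec_sort_by_x_then_by_y
  set n := x_lst.length with hn
  have hres0 : (x_lst.map (fun _ => ([] : List (List Int)))).length = n := by simp [hn]
  have hbound : ∀ p ∈ points, -(n : Int) ≤ keyOf x_to_idx p ∧ keyOf x_to_idx p < n := by
    intro p hp
    obtain ⟨-, hany⟩ := hpre p hp
    cases hv : (x_to_idx.lookup (PySem.List.pyGetD p 0 0)) with
    | none => simp [hv] at hany
    | some v =>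
      rw [hv] at hany
      simp only [Option.any_some, Bool.and_eq_true, decide_eq_true_eq] at hany
      unfold keyOf
      rw [hv]
      simpa [hn] using hany
  unfold sort_by_x_then_by_y sort_by_x_then_by_y_alt
  rw [pyDistribute_eq_foldl]
  apply List.ext_getElem?
  intro j
  rw [List.getElem?_map]
  rw [distrib_getElem? x_to_idx points _ (by rw [hres0]; exact hbound) j]
  rw [distrib_getElem? x_to_idx _ _ (by
    rw [hres0]
    intro p hp
    exact hbound p ((PySem.List.mem_sorted _ _ _ p).mp hp)) j]
  rw [hres0]
  cases hr : (x_lst.map (fun _ => ([] : List (List Int))))[j]? with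
  | none => simp
  | some b =>
    have hb : b = [] := by
      rcases List.getElem?_eq_some_iff.mp hr with ⟨hj, hbj⟩
      simp only [List.getElem_map] at hbj
      exact hbj.symm
    subst hb
    simp only [Option.map_some, List.nil_append, Option.some.injEq]
    exact (filter_sorted (fun q => PySem.List.pyGetD q 1 0)
      (fun p => bIdx n (keyOf x_to_idx p) == j) points).symm
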